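-- pv_equiv track=rewrite | github.com/dmtkfs/vscode-projects | INSE6110/project1.py | encr_decr
-- ===== SOURCE A (Python) =====
-- def square_and_multiply(base, exponent, modulus):
--
--     result = 1  # initialize the result.
--     base = base % modulus  # optimization to avoid overflow.
--
--     while exponent > 0:  # using exponent as counter.
--         if exponent % 2 == 1:  # checking if the LSB is equal to 1.
--             result = (
--                 result * base
--             ) % modulus  # if it is, take the squared base and multiply it with base, then mod with N.
--         exponent //= 2  # reduce the exponent.
--         base = (
--             base * base
--         ) % modulus  # if the bit is -, square the base, then mod with N.
--
--     return result
--
-- def encr_decr(N, e_or_d, text):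
--
--     converted_message = []
--
--     for i in range(len(text)):
--         converted_message.append(
--             square_and_multiply(text[i], e_or_d, N)
--         )  # fill the list with the encrypted/decrypted elements using square and multiply to handle big integers.
--
--     converted_message = tuple(converted_message)  # convert to tuple for protection.
--
--     return converted_message
-- ===== SOURCE B (Python) =====
-- def _pow_mod_msb(base, exponent, modulus):
--     # left-to-right (MSB-first) binary exponentiation
--     if exponent <= 0:
--         return 1
--     bits = []
--     e = exponent
--     while e > 0:
--         bits.append(e % 2)
--         e //= 2
--     b = base % modulus
--     result = 1
--     for bit in reversed(bits):
--         result = result * result % modulus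
--         if bit:
--             result = result * b % modulus
--     return result
--
--
-- def encr_decr(N, e_or_d, text):
--     return tuple(_pow_mod_msb(x, e_or_d, N) for x in text)
-- ===== Notes on version B (the rewrite author's own statement) =====
-- stated objective: alternative
-- what changed: Per-element modular exponentiation is re-decomposed as left-to-right (MSB-first) binary exponentiation that squares the accumulator over an explicitly extracted bit list, instead of A's right-to-left loop that squares the base; the outer indexed append-loop becomes a direct map over the message.
import Mathlib
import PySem

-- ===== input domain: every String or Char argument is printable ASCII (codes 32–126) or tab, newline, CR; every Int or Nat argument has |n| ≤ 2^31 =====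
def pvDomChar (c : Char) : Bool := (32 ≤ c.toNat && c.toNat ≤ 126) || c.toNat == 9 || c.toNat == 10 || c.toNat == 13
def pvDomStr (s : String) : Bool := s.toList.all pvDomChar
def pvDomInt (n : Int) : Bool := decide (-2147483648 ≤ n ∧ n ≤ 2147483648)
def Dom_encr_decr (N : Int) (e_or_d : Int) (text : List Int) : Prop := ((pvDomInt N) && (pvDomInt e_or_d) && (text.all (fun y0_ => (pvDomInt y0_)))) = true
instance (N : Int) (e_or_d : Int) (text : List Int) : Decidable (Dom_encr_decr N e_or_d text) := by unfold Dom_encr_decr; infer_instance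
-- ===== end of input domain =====

-- B replaces A's right-to-left square-and-multiply (squaring the base) with a left-to-right
-- MSB-first binary exponentiation (squaring the accumulator): an alternative decomposition.


-- ===== PORT A =====
-- A's while-loop: state (exponent, base, result); recursion on exponent.toNat.
def samLoop (modulus : Int) (exponent : Int) (base : Int) (result : Int) : Int :=
  if _h : exponent > 0 then
    let result' := if PySem.Int.mod exponent 2 = 1 then PySem.Int.mod (result * base) modulus else result
    samLoop modulus (PySem.Int.floordiv exponent 2) (PySem.Int.mod (base * base) modulus) result'
  else
    result
termination_by exponent.toNat
decreasing_by
  have h1 := PySem.Int.floordiv_mul_add_mod exponent 2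
  have h2 := PySem.Int.mod_nonneg exponent (b := 2) (by omega)
  have h3 := PySem.Int.mod_lt exponent (b := 2) (by omega)
  omega

def square_and_multiply (base : Int) (exponent : Int) (modulus : Int) : Int :=
  samLoop modulus exponent (PySem.Int.mod base modulus) 1

def encr_decr (N : Int) (e_or_d : Int) (text : List Int) : List Int :=
  (PySem.List.pyRange 0 text.length 1).foldl
    (fun acc i => acc ++ [square_and_multiply (PySem.List.pyGetD text i 0) e_or_d N]) []

-- ===== PORT B =====
-- bits of e, least significant first (B's first while-loop).
def pvBits (e : Int) : List Int :=
  if _h : e > 0 then PySem.Int.mod e 2 :: pvBits (PySem.Int.floordiv e 2) else []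
termination_by e.toNat
decreasing_by
  have h1 := PySem.Int.floordiv_mul_add_mod e 2
  have h2 := PySem.Int.mod_nonneg e (b := 2) (by omega)
  have h3 := PySem.Int.mod_lt e (b := 2) (by omega)
  omega

-- one step of B's for-loop over the reversed bit list
def pvStep (modulus : Int) (b : Int) (result : Int) (bit : Int) : Int :=
  let r2 := PySem.Int.mod (result * result) modulus
  if bit ≠ 0 then PySem.Int.mod (r2 * b) modulus else r2

def pow_mod_msb (base : Int) (exponent : Int) (modulus : Int) : Int :=
  if exponent ≤ 0 then 1
  else
    (pvBits exponent).reverse.foldl (pvStep modulus (PySem.Int.mod base modulus)) 1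

def encr_decr_alt (N : Int) (e_or_d : Int) (text : List Int) : List Int :=
  text.map (fun x => pow_mod_msb x e_or_d N)

-- ===== PRECONDITION & SPEC =====
-- Pre_ excludes exactly the inputs where Python A raises ZeroDivisionError:
-- N = 0 with a nonempty message (base % modulus with modulus 0).
def Pre_encr_decr (N : Int) (e_or_d : Int) (text : List Int) : Prop := N ≠ 0 ∨ text = []
instance (N : Int) (e_or_d : Int) (text : List Int) : Decidable (Pre_encr_decr N e_or_d text) := by unfold Pre_encr_decr; infer_instance

def pvWitness_encr_decr : Int × Int × List Int := (77, 13, [5, 0, 76])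

def Spec_encr_decr (N : Int) (e_or_d : Int) (text : List Int) (out : List Int) : Prop := out = encr_decr_alt N e_or_d text
instance (N : Int) (e_or_d : Int) (text : List Int) (out : List Int) : Decidable (Spec_encr_decr N e_or_d text out) := by unfold Spec_encr_decr; infer_instance

-- ===== CLAIM (what is proved, stated in full; the proofs are below) =====
def Claim_equal_encr_decr : Prop := ∀ (N : Int) (e_or_d : Int) (text : List Int), Dom_encr_decr N e_or_d text → Pre_encr_decr N e_or_d text → Spec_encr_decr N e_or_d text (encr_decr N e_or_d text)

-- ===== LEMMAS AND PROOFS =====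

-- Python '%' is a congruence: reducing a factor first does not change the residue.
theorem fmod_mul_left (a b n : Int) : ((a.fmod n) * b).fmod n = (a * b).fmod n := by
  rw [Int.fmod_def a n]
  have : (a - n * a.fdiv n) * b = a * b + n * (-(a.fdiv n * b)) := by ring
  rw [this, Int.add_mul_fmod_self_left]

theorem fmod_pow_mul (a b n : Int) (k : Nat) :
    (((a.fmod n)) ^ k * b).fmod n = (a ^ k * b).fmod n := by
  induction k generalizing b with
  | zero => simp
  | succ k ih =>
    have h1 : (a.fmod n) ^ (k + 1) * b = (a.fmod n) ^ k * ((a.fmod n) * b) := by ring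
    have h2 : a ^ k * ((a.fmod n) * b) = (a.fmod n) * (a ^ k * b) := by ring
    have h3 : a * (a ^ k * b) = a ^ (k + 1) * b := by ring
    rw [h1, ih, h2, fmod_mul_left, h3]

-- facts about floordiv/mod by 2 bundled for omega
theorem half_facts (e : Int) :
    PySem.Int.floordiv e 2 * 2 + PySem.Int.mod e 2 = e ∧
    0 ≤ PySem.Int.mod e 2 ∧ PySem.Int.mod e 2 < 2 :=
  ⟨PySem.Int.floordiv_mul_add_mod e 2,
   PySem.Int.mod_nonneg e (by omega), PySem.Int.mod_lt e (by omega)⟩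

-- A's loop computes result * base^exponent mod N (for positive exponent).
theorem samLoop_eq (modulus : Int) (e : Int) (base result : Int) (he : 0 < e) :
    samLoop modulus e base result = (result * base ^ e.toNat).fmod modulus := by
  have hmod : PySem.Int.mod = Int.fmod := rfl
  induction hn : e.toNat using Nat.strong_induction_on generalizing e base result with
  | _ n ih =>
  obtain ⟨hdm, hm0, hm2⟩ := half_facts e
  rw [samLoop, dif_pos he]
  set q := PySem.Int.floordiv e 2 with hq
  by_cases hq0 : 0 < q
  · rw [ih q.toNat (by omega) q _ _ hq0 rfl]
    have hb : ((PySem.Int.mod (base * base) modulus)) ^ q.toNat =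
        ((base * base).fmod modulus) ^ q.toNat := by rw [hmod]
    by_cases hodd : PySem.Int.mod e 2 = 1
    · rw [if_pos hodd, hb, hmod]
      rw [show ((result * base).fmod modulus * ((base * base).fmod modulus) ^ q.toNat)
            = (((base * base).fmod modulus) ^ q.toNat * (result * base).fmod modulus) by ring]
      rw [fmod_pow_mul]
      rw [show ((base * base) ^ q.toNat * ((result * base).fmod modulus))
            = ((result * base).fmod modulus * (base * base) ^ q.toNat) by ring]
      rw [fmod_mul_left]
      congr 1
      have hexp : n = 2 * q.toNat + 1 := by omega
      rw [hexp]
      ring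
    · rw [if_neg hodd, hb]
      rw [show (result * ((base * base).fmod modulus) ^ q.toNat)
            = (((base * base).fmod modulus) ^ q.toNat * result) by ring]
      rw [fmod_pow_mul]
      congr 1
      have hexp : n = 2 * q.toNat := by omega
      rw [hexp]
      ring
  · -- q = 0, so e = 1
    have hodd : PySem.Int.mod e 2 = 1 := by omega
    rw [if_pos hodd]
    rw [samLoop, dif_neg (by omega)]
    rw [hmod]
    congr 1
    have hn1 : n = 1 := by omega
    rw [hn1, pow_one]
-- footnote: samLoop's recursion is on e.toNat, ih instantiated at the half exponent.

-- value of a bit list, least significant first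
def valL : List Int → Nat
  | [] => 0
  | bit :: l => bit.toNat + 2 * valL l

-- value of a bit list, most significant first
def valM : List Int → Nat
  | [] => 0
  | bit :: l => bit.toNat * 2 ^ l.length + valM l

theorem valM_append (l : List Int) (bit : Int) : valM (l ++ [bit]) = 2 * valM l + bit.toNat := by
  induction l with
  | nil => simp [valM]
  | cons b l ih => simp [valM, ih]; ring

theorem valM_reverse (l : List Int) : valM l.reverse = valL l := by
  induction l with
  | nil => rfl
  | cons b l ih => simp [List.reverse_cons, valM_append, ih, valL]; ring

theorem pvBits_spec (e : Int) (he : 0 < e) :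
    valL (pvBits e) = e.toNat ∧ pvBits e ≠ [] ∧ ∀ bit ∈ pvBits e, bit = 0 ∨ bit = 1 := by
  induction hn : e.toNat using Nat.strong_induction_on generalizing e with
  | _ n ih =>
  obtain ⟨hdm, hm0, hm2⟩ := half_facts e
  rw [pvBits, dif_pos he]
  set q := PySem.Int.floordiv e 2 with hq
  by_cases hq0 : 0 < q
  · obtain ⟨hv, _, hb⟩ := ih q.toNat (by omega) q hq0 rfl
    refine ⟨?_, by simp, ?_⟩
    · simp only [valL, hv]; omega
    · intro bit hbit
      rcases List.mem_cons.mp hbit with h | h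
      · omega
      · exact hb bit h
  · have hqe : q = 0 := by omega
    rw [pvBits, dif_neg (by omega)]
    refine ⟨?_, by simp, ?_⟩
    · simp only [valL]; omega
    · intro bit hbit
      rcases List.mem_cons.mp hbit with h | h
      · omega
      · simp at h

-- B's fold over an MSB-first bit list computes r^(2^len) * b^(valM) mod N.
theorem foldl_pvStep_eq (modulus b : Int) (l : List Int) (r : Int)
    (hl : l ≠ []) (hbits : ∀ bit ∈ l, bit = 0 ∨ bit = 1) :
    l.foldl (pvStep modulus b) r = (r ^ (2 ^ l.length) * b ^ valM l).fmod modulus := by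
  have hmod : PySem.Int.mod = Int.fmod := rfl
  induction l generalizing r with
  | nil => exact absurd rfl hl
  | cons bit l ih =>
    have hbit : bit = 0 ∨ bit = 1 := hbits bit (by simp)
    have hstep : pvStep modulus b r bit = ((r ^ 2 * b ^ bit.toNat).fmod modulus) := by
      rcases hbit with h | h <;> subst h
      · simp only [pvStep, hmod]
        rw [if_neg (by norm_num)]
        congr 1
        simp only [Int.toNat_zero, pow_zero, mul_one]
        ring
      · simp only [pvStep, hmod]
        rw [if_pos (by norm_num)]
        rw [fmod_mul_left]
        congr 1
        simp only [Int.toNat_one, pow_one]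
        ring
    rcases List.eq_nil_or_concat' l with hnil | _
    · subst hnil
      simp only [List.foldl_cons, List.foldl_nil, hstep, valM, List.length_cons,
        List.length_nil, valM]
      norm_num
    · have hl' : l ≠ [] := by rintro rfl; simp_all
      simp only [List.foldl_cons, hstep]
      rw [ih _ hl' (fun x hx => hbits x (by simp [hx]))]
      rw [fmod_pow_mul]
      congr 1
      simp only [valM, List.length_cons]
      rw [mul_pow, ← pow_mul, ← pow_mul, pow_add b, pow_succ]
      ring

theorem pow_mod_msb_eq (base e modulus : Int) :
    pow_mod_msb base e modulus = samLoop modulus e (PySem.Int.mod base modulus) 1 := by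
  have hmod : PySem.Int.mod = Int.fmod := rfl
  by_cases he : 0 < e
  · obtain ⟨hv, hne, hbits⟩ := pvBits_spec e he
    rw [pow_mod_msb, if_neg (by omega)]
    rw [foldl_pvStep_eq _ _ _ _ (by simpa using hne)
        (fun x hx => hbits x (List.mem_reverse.mp hx))]
    rw [samLoop_eq _ _ _ _ he]
    rw [valM_reverse, hv, one_pow, one_mul]
  · rw [pow_mod_msb, if_pos (by omega), samLoop, dif_neg he]

theorem encr_map (N e : Int) (text : List Int) :
    encr_decr N e text = text.map (fun x => square_and_multiply x e N) := by
  unfold encr_decr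
  rw [PySem.List.foldl_pyRange_zero_pyGetD' text 0
    (fun acc v => acc ++ [square_and_multiply v e N]) []]
  simpa using PySem.List.foldl_append_singleton_eq_map (fun v => square_and_multiply v e N) text []

-- ===== VERDICT (by name: the statement is the Claim_ definition above) =====
theorem encr_decr_spec : Claim_equal_encr_decr := by
  intro N e text _ _
  unfold Spec_encr_decr
  rw [encr_map]
  unfold encr_decr_alt
  apply List.map_congr_left
  intro x _
  rw [pow_mod_msb_eq]
  rfl
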